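-- pv_equiv track=rewrite | github.com/MohamedAli2002/GP-Decentralized-Multi-Robot-Path-Planning-Using-Graph-Neural-Network | Mo_Star.py | check_confilicts
-- ===== SOURCE A (Python) =====
-- def check_confilicts(paths):
--     if None in paths:
--         return 0
--     num_of_confilicts = 0
--     list_of_confilicts = []
--     max_len = max(paths)
--     for step in range(len(max_len)):
--         step_nodes = {}
--         for path in paths:
--             if step < len(path):
--                 if (path[step][0],path[step][1],step) in step_nodes:
--                     num_of_confilicts+=1
--                     list_of_confilicts.append((path[step][0],path[step][1],step))
--                 else:
--                     step_nodes[(path[step][0],path[step][1],step)] = 1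
--             else:
--                 if (path[-1][0],path[-1][1],step) in step_nodes:
--                     num_of_confilicts+=1
--                     list_of_confilicts.append((path[-1][0],path[-1][1],step))
--                 else:
--                     step_nodes[(path[-1][0],path[-1][1],step)] = 1
--         step_nodes.clear()
--     return num_of_confilicts
-- ===== SOURCE B (Python) =====
-- def check_confilicts(paths):
--     if None in paths:
--         return 0
--     steps = len(max(paths))
--     occupied = set()
--     for path in paths:
--         for step in range(steps):
--             node = path[step] if step < len(path) else path[-1]
--             occupied.add((node[0], node[1], step))
--     return len(paths) * steps - len(occupied)
-- ===== Notes on version B (the rewrite author's own statement) =====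
-- stated objective: alternative
-- what changed: B inverts the loop nesting (path-major instead of A's step-major), builds one global set of (x,y,step) triples in a single pass with no per-step state, and returns the closed form len(paths)*steps - len(occupied) instead of A's per-element membership-test counting with a dict and a dead conflict list.
-- outside the precondition, e.g. on check_confilicts([]): A raises ValueError, B raises ValueError
import Mathlib
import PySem

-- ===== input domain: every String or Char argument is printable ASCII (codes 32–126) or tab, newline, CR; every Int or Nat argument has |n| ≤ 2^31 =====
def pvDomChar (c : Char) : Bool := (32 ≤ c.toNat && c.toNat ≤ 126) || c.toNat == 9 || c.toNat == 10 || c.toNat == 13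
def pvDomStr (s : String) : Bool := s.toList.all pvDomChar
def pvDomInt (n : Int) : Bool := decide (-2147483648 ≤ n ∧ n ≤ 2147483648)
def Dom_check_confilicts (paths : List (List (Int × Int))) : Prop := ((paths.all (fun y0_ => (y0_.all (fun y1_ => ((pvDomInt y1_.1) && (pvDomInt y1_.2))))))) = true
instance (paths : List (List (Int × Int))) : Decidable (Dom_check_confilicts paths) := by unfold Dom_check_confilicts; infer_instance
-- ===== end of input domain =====

-- B inverts the loop nesting (path-major, one global set of (x,y,step) triples built in a single
-- pass) and returns the closed form len(paths)*steps - len(occupied), replacing A's step-major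
-- per-element dict-membership counting (and its dead list_of_confilicts); return value only.

-- ===== PORT A =====
-- Python's '<' on (int, int) tuples (lexicographic)
def pvPairLt (p q : Int × Int) : Bool := p.1 < q.1 || (p.1 == q.1 && p.2 < q.2)

-- Python's '<' on lists of such tuples (lexicographic); used by max(paths)
def pvPathLt : List (Int × Int) → List (Int × Int) → Bool
  | _, [] => false
  | [], _ :: _ => true
  | a :: as, b :: bs => if pvPairLt a b then true else if a == b then pvPathLt as bs else false

-- max(paths): running max keeping the FIRST maximal element (updates only on strictly greater);
-- Python raises ValueError on [], which Pre_ excludes (the Lean value [] there is not claimed)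
def pvMaxPath (paths : List (List (Int × Int))) : List (Int × Int) :=
  match paths with
  | [] => []
  | h :: t => t.foldl (fun m x => if pvPathLt m x then x else m) h

-- the node a path occupies at a step: path[step] if step < len(path) else path[-1]
-- (pyGetD's default (0,0) is only reached where Python raises IndexError — excluded by Pre_)
def pvNode (step : Int) (path : List (Int × Int)) : Int × Int :=
  if step < (path.length : Int) then PySem.List.pyGetD path step (0, 0)
  else PySem.List.pyGetD path (-1) (0, 0)

-- 'if None in paths: return 0' cannot fire under the type List (List (Int × Int)) (no None value), so it is omitted
def check_confilicts (paths : List (List (Int × Int))) : Int :=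
  let max_len := pvMaxPath paths
  let r := (PySem.List.pyRange 0 (max_len.length : Int) 1).foldl
    (fun (s : Int × List (Int × Int × Int) × PySem.Dict (Int × Int × Int) Int) step =>
      paths.foldl
        (fun s path =>
          let p := pvNode step path
          let node := (p.1, p.2, step)
          if s.2.2.contains node then (s.1 + 1, s.2.1 ++ [node], s.2.2)
          else (s.1, s.2.1, s.2.2.insert node 1))
        (s.1, s.2.1, PySem.Dict.empty))   -- step_nodes = {} afresh each step (and .clear() at the end)
    (0, [], PySem.Dict.empty)
  r.1

-- ===== PORT B =====
def check_confilicts_alt (paths : List (List (Int × Int))) : Int :=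
  let steps := (pvMaxPath paths).length
  let occupied : PySem.Set (Int × Int × Int) :=
    paths.foldl (fun occ path =>
      (PySem.List.pyRange 0 (steps : Int) 1).foldl (fun occ step =>
        let node := pvNode step path
        PySem.Set.add occ (node.1, node.2, step)) occ)
      PySem.Set.empty
  (paths.length : Int) * (steps : Int) - PySem.Set.len occupied

-- ===== PRECONDITION & SPEC =====
-- Pre_ excludes exactly the inputs where Python A raises: ValueError from max([]) on the empty list,
-- and IndexError from path[-1] when an empty path coexists with a nonempty one.
def Pre_check_confilicts (paths : List (List (Int × Int))) : Prop :=
  paths ≠ [] ∧ ((∀ p ∈ paths, p ≠ []) ∨ (∀ p ∈ paths, p = []))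
instance (paths : List (List (Int × Int))) : Decidable (Pre_check_confilicts paths) := by
  unfold Pre_check_confilicts; infer_instance

def pvWitness_check_confilicts : (List (List (Int × Int))) := [[(0, 0)], [(0, 0)]]

def Spec_check_confilicts (paths : List (List (Int × Int))) (out : Int) : Prop := out = check_confilicts_alt paths
instance (paths : List (List (Int × Int))) (out : Int) : Decidable (Spec_check_confilicts paths out) := by
  unfold Spec_check_confilicts; infer_instance

-- ===== CLAIM (what is proved, stated in full; the proofs are below) =====
def Claim_equal_check_confilicts : Prop := ∀ (paths : List (List (Int × Int))), Dom_check_confilicts paths → Pre_check_confilicts paths → Spec_check_confilicts paths (check_confilicts paths)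

-- ===== LEMMAS AND PROOFS =====

-- the tagged triple a path contributes at a step
def pvTag (step : Int) (path : List (Int × Int)) : Int × Int × Int :=
  ((pvNode step path).1, (pvNode step path).2, step)

-- |set(l)| = |l.toFinset|
theorem pv_len_ofList (l : List (Int × Int × Int)) :
    PySem.Set.len (PySem.Set.ofList l) = (l.toFinset.card : Int) := by
  have hn : (PySem.Set.ofList l).Nodup := PySem.Set.nodup_ofList l
  have hfin : (PySem.Set.ofList l).toFinset = l.toFinset := by
    ext a; simp [List.mem_toFinset, PySem.Set.mem_ofList]
  have := List.toFinset_card_of_nodup hn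
  simp only [PySem.Set.len, hfin] at this ⊢
  omega

-- A's inner loop over a list of keys: the count advances by (#keys) minus (#keys newly added to the dict)
theorem pv_inner_count {κ : Type} [BEq κ] [LawfulBEq κ]
    (ks : List κ) (c : Int) (l : List κ) (d : PySem.Dict κ Int) (hnd : d.keys.Nodup) :
    (ks.foldl (fun (s : Int × List κ × PySem.Dict κ Int) k =>
        if s.2.2.contains k then (s.1 + 1, s.2.1 ++ [k], s.2.2)
        else (s.1, s.2.1, s.2.2.insert k 1)) (c, l, d)).1
      = c + (ks.length : Int)
        - (((PySem.Set.update (PySem.Set.ofList d.keys) ks).length : Int) - (d.keys.length : Int)) := by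
  induction ks generalizing c l d with
  | nil =>
    simp only [List.foldl_nil, List.length_nil, PySem.Set.update_nil,
      PySem.Set.ofList_eq_self_of_nodup _ hnd]
    push_cast; ring
  | cons k ks ih =>
    simp only [List.foldl_cons, List.length_cons]
    by_cases h : d.contains k = true
    · rw [if_pos h, ih (c + 1) (l ++ [k]) d hnd]
      have hk : k ∈ PySem.Set.ofList d.keys := by
        rw [PySem.Set.mem_ofList]; exact (PySem.Dict.contains_iff_mem_keys d k).mp h
      rw [PySem.Set.update_cons, PySem.Set.add_of_mem hk]
      push_cast; ring
    · rw [if_neg h, ih c l (d.insert k 1) ?_]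
      · have hne : (d.insert k 1).keys = d.keys ++ [k] :=
          PySem.Dict.keys_insert_of_not_contains d 1 (by simpa using h)
        have hkn : k ∉ PySem.Set.ofList d.keys := by
          rw [PySem.Set.mem_ofList]
          intro hm
          exact h ((PySem.Dict.contains_iff_mem_keys d k).mpr hm)
        rw [hne, PySem.Set.ofList_append_singleton, PySem.Set.update_cons]
        simp only [List.length_append, List.length_singleton]
        push_cast; ring
      · rw [PySem.Dict.keys_insert_of_not_contains d 1 (by simpa using h)]
        refine List.Nodup.append hnd (List.nodup_singleton k) ?_
        intro a ha hb
        simp only [List.mem_singleton] at hb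
        subst hb
        exact h ((PySem.Dict.contains_iff_mem_keys d a).mpr ha) |>.elim

-- one step of A: the count advances by N - |{tagged triples at this step}|
theorem pv_step_eq (paths : List (List (Int × Int))) (step : Int) (c : Int) (l : List (Int × Int × Int)) :
    (paths.foldl
        (fun (s : Int × List (Int × Int × Int) × PySem.Dict (Int × Int × Int) Int) path =>
          let p := pvNode step path
          let node := (p.1, p.2, step)
          if s.2.2.contains node then (s.1 + 1, s.2.1 ++ [node], s.2.2)
          else (s.1, s.2.1, s.2.2.insert node 1))
        (c, l, PySem.Dict.empty)).1
      = c + (paths.length : Int) - ((paths.map (pvTag step)).toFinset.card : Int) := by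
  have hmap : paths.foldl
        (fun (s : Int × List (Int × Int × Int) × PySem.Dict (Int × Int × Int) Int) path =>
          let p := pvNode step path
          let node := (p.1, p.2, step)
          if s.2.2.contains node then (s.1 + 1, s.2.1 ++ [node], s.2.2)
          else (s.1, s.2.1, s.2.2.insert node 1))
        (c, l, PySem.Dict.empty)
      = (paths.map (pvTag step)).foldl
        (fun (s : Int × List (Int × Int × Int) × PySem.Dict (Int × Int × Int) Int) node =>
          if s.2.2.contains node then (s.1 + 1, s.2.1 ++ [node], s.2.2)
          else (s.1, s.2.1, s.2.2.insert node 1))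
        (c, l, PySem.Dict.empty) := by
    rw [List.foldl_map]; rfl
  rw [hmap, pv_inner_count _ c l PySem.Dict.empty (by simp [PySem.Dict.keys_empty])]
  rw [← pv_len_ofList]
  simp only [PySem.Dict.keys_empty, PySem.Set.ofList_nil, PySem.Set.update_nil_left,
    List.length_nil, List.length_map, PySem.Set.len]
  push_cast; ring

-- A's outer loop is a linear scan: total = c0 + N*|L| - Σ_{step∈L} |{triples at step}|
theorem pv_outer_A (paths : List (List (Int × Int))) (L : List Int) :
    ∀ (c : Int) (l : List (Int × Int × Int)) (d : PySem.Dict (Int × Int × Int) Int),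
    (L.foldl
        (fun (s : Int × List (Int × Int × Int) × PySem.Dict (Int × Int × Int) Int) step =>
          paths.foldl
            (fun s path =>
              let p := pvNode step path
              let node := (p.1, p.2, step)
              if s.2.2.contains node then (s.1 + 1, s.2.1 ++ [node], s.2.2)
              else (s.1, s.2.1, s.2.2.insert node 1))
            (s.1, s.2.1, PySem.Dict.empty))
        (c, l, d)).1
      = c + (paths.length : Int) * (L.length : Int)
        - ((L.map (fun step => (paths.map (pvTag step)).toFinset.card)).sum : Int) := by
  induction L with
  | nil => intro c l d; simp
  | cons step L ih =>
    intro c l d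
    simp only [List.foldl_cons, List.map_cons, List.sum_cons, List.length_cons]
    have h1 := ih (c + (paths.length : Int) - ((paths.map (pvTag step)).toFinset.card : Int))
    -- the state after the first step has that first component
    rw [ih _ _ _, pv_step_eq paths step c l]
    push_cast; ring

-- B's nested foldl builds set(path-major flatMap of tagged triples)
theorem pv_B_set (paths : List (List (Int × Int))) (L : List Int) :
    (paths.foldl (fun occ path =>
        L.foldl (fun occ step =>
          let node := pvNode step path
          PySem.Set.add occ (node.1, node.2, step)) occ)
      PySem.Set.empty)
      = PySem.Set.ofList (paths.flatMap (fun path => L.map (fun step => pvTag step path))) := by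
  have key : ∀ (s : PySem.Set (Int × Int × Int)),
      paths.foldl (fun occ path =>
        L.foldl (fun occ step =>
          let node := pvNode step path
          PySem.Set.add occ (node.1, node.2, step)) occ) s
      = PySem.Set.update s (paths.flatMap (fun path => L.map (fun step => pvTag step path))) := by
    induction paths with
    | nil => intro s; simp [PySem.Set.update_nil]
    | cons p ps ih =>
      intro s
      simp only [List.foldl_cons, List.flatMap_cons, PySem.Set.update_append]
      rw [ih, ← PySem.Set.update_map_eq_foldl_add]
      simp only [pvTag]
  rw [key PySem.Set.empty]
  exact PySem.Set.update_nil_left _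

-- transpose: the path-major and step-major triple lists have the same toFinset
theorem pv_transpose (paths : List (List (Int × Int))) (L : List Int) :
    (paths.flatMap (fun path => L.map (fun step => pvTag step path))).toFinset
      = (L.flatMap (fun step => paths.map (pvTag step))).toFinset := by
  ext a
  simp only [List.mem_toFinset, List.mem_flatMap, List.mem_map]
  constructor
  · rintro ⟨p, hp, s, hs, rfl⟩; exact ⟨s, hs, p, hp, rfl⟩
  · rintro ⟨s, hs, p, hp, rfl⟩; exact ⟨p, hp, s, hs, rfl⟩

-- blocks at distinct steps are disjoint, so the global card is the sum of per-step cards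
theorem pv_card_flatMap (paths : List (List (Int × Int))) (L : List Int) (hL : L.Nodup) :
    (L.flatMap (fun step => paths.map (pvTag step))).toFinset.card
      = (L.map (fun step => (paths.map (pvTag step)).toFinset.card)).sum := by
  induction L with
  | nil => simp
  | cons s L ih =>
    simp only [List.nodup_cons] at hL
    simp only [List.flatMap_cons, List.map_cons, List.sum_cons, List.toFinset_append]
    rw [Finset.card_union_of_disjoint, ih hL.2]
    rw [Finset.disjoint_left]
    intro a ha hb
    simp only [List.mem_toFinset, List.mem_map] at ha
    simp only [List.mem_toFinset, List.mem_flatMap, List.mem_map] at hb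
    obtain ⟨p, _, rfl⟩ := ha
    obtain ⟨s', hs', p', _, he⟩ := hb
    have : s' = s := by
      have := congrArg (fun (t : Int × Int × Int) => t.2.2) he
      simpa [pvTag] using this
    exact hL.1 (this ▸ hs')

-- ===== VERDICT (by name: the statement is the Claim_ definition above) =====
theorem check_confilicts_spec : Claim_equal_check_confilicts := by
  intro paths _ _
  unfold Spec_check_confilicts check_confilicts check_confilicts_alt
  simp only
  rw [pv_outer_A paths _ 0 [] PySem.Dict.empty, pv_B_set, pv_len_ofList, pv_transpose,
    pv_card_flatMap paths _ (PySem.List.nodup_pyRange_one 0 _),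
    PySem.List.length_pyRange_one]
  simp only [Int.sub_zero, Int.toNat_natCast]
  push_cast
  ring
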